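-- pv_equiv track=rewrite | github.com/BrendanBarber/senate-model | district_map.py | hex_grid_positions
-- ===== SOURCE A (Python) =====
-- _HEX_DIRS = [(-1, 1), (-1, 0), (0, -1), (1, -1), (1, 0), (0, 1)]
--
-- def hex_grid_positions(n: int) -> list[tuple[int, int]]:
--     positions = []
--     ring = 0
--     while len(positions) < n:
--         if ring == 0:
--             positions.append((0, 0))
--         else:
--             x, y = ring, 0
--             for dx, dy in _HEX_DIRS:
--                 for _ in range(ring):
--                     if len(positions) >= n:
--                         break
--                     positions.append((x, y))
--                     x += dx; y += dy
--         ring += 1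
--     return positions[:n]
-- ===== SOURCE B (Python) =====
-- _HEX_DIRS = [(-1, 1), (-1, 0), (0, -1), (1, -1), (1, 0), (0, 1)]
--
-- def _ring_of(i):
--     # smallest r >= 1 with i < 1 + 3*r*(r+1), by galloping then binary search
--     hi = 1
--     while 1 + 3 * hi * (hi + 1) <= i:
--         hi = 2 * hi + 1
--     lo = 1
--     while lo < hi:
--         mid = (lo + hi) // 2
--         if 1 + 3 * mid * (mid + 1) <= i:
--             lo = mid + 1
--         else:
--             hi = mid
--     return lo
--
-- def _pos(i):
--     # direct closed-form spiral coordinate for index i (no accumulated state)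
--     if i == 0:
--         return (0, 0)
--     r = _ring_of(i)
--     off = i - (1 + 3 * (r - 1) * r)  # position within ring r (0 <= off < 6r)
--     side = off // r
--     step = off % r
--     x, y = r, 0
--     for dx, dy in _HEX_DIRS[:side]:  # walk prior full sides to the corner
--         x += r * dx
--         y += r * dy
--     dx, dy = _HEX_DIRS[side]
--     return (x + step * dx, y + step * dy)
--
-- def hex_grid_positions(n: int) -> list[tuple[int, int]]:
--     return [_pos(i) for i in range(n)]
-- ===== Notes on version B (the rewrite author's own statement) =====
-- stated objective: alternative
-- what changed: B computes each spiral coordinate independently from its index (binary-searched enclosing ring, then side/step via divmod and a corner walk) instead of A's stateful while-loop that appends positions while walking ring after ring.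
import Mathlib
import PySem

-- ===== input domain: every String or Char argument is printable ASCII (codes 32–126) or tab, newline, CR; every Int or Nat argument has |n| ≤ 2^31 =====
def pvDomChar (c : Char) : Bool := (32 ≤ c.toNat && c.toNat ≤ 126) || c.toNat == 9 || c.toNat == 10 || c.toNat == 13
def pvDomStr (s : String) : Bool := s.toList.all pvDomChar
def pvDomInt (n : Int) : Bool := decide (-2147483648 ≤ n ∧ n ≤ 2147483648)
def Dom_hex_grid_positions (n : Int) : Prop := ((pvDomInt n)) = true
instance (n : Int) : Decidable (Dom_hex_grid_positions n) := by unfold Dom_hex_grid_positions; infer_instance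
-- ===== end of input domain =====

-- B recomputes each spiral coordinate directly from its index (ring/side/step arithmetic)
-- instead of A's stateful ring-walking loop; objective: alternative algorithm, same results.

-- ===== PORT A =====
def hexDirs : List (Int × Int) := [(-1, 1), (-1, 0), (0, -1), (1, -1), (1, 0), (0, 1)]

-- inner 'for _ in range(ring)' loop with its early 'break' when len(positions) >= n
def innerA (n : Int) (d : Int × Int) : List (Int × Int) × Int × Int → Nat → List (Int × Int) × Int × Int
  | st, 0 => st
  | (pos, x, y), Nat.succ k =>
      if ((pos.length : Int) < n) then innerA n d (pos ++ [(x, y)], x + d.1, y + d.2) k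
      else (pos, x, y)

-- the 'for dx, dy in _HEX_DIRS' loop of one ring (ring ≥ 1), starting at (ring, 0)
def ringA (n : Int) (ring : Nat) (pos : List (Int × Int)) : List (Int × Int) :=
  (hexDirs.foldl (fun st d => innerA n d st ring) (pos, (ring : Int), 0)).1

theorem innerA_len_mono (n : Int) (d : Int × Int) :
    ∀ (k : Nat) (st : List (Int × Int) × Int × Int), st.1.length ≤ (innerA n d st k).1.length := by
  intro k
  induction k with
  | zero => intro st; simp [innerA]
  | succ k ih =>
      rintro ⟨pos, x, y⟩
      simp only [innerA]
      split
      · exact le_trans (by simp) (ih _)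
      · simp

theorem foldl_innerA_len_mono (n : Int) (r : Nat) :
    ∀ (ds : List (Int × Int)) (st : List (Int × Int) × Int × Int),
      st.1.length ≤ ((ds.foldl (fun st d => innerA n d st r) st)).1.length := by
  intro ds
  induction ds with
  | nil => intro st; simp
  | cons d ds ih =>
      intro st
      simpa using le_trans (innerA_len_mono n d r st) (ih _)

theorem ringA_len_succ (n : Int) (ring : Nat) (pos : List (Int × Int))
    (hr : ring ≠ 0) (h : (pos.length : Int) < n) :
    pos.length + 1 ≤ (ringA n ring pos).length := by
  obtain ⟨k, rfl⟩ : ∃ k, ring = k + 1 := ⟨ring - 1, by omega⟩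
  unfold ringA
  have h1 : pos.length + 1 ≤ (innerA n (-1,1) (pos, ((k+1 : Nat) : Int), 0) (k+1)).1.length := by
    simp only [innerA]
    rw [if_pos h]
    calc pos.length + 1 = (pos ++ [(((k+1 : Nat) : Int), (0:Int))]).length := by simp
      _ ≤ _ := innerA_len_mono n (-1,1) k (pos ++ [(((k+1 : Nat) : Int), (0:Int))], ((k+1 : Nat) : Int) + -1, 0 + 1)
  have h2 := foldl_innerA_len_mono n (k+1) [(-1,0),(0,-1),(1,-1),(1,0),(0,1)]
    (innerA n (-1,1) (pos, ((k+1 : Nat) : Int), 0) (k+1))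
  simp only [hexDirs, List.foldl_cons] at h2 ⊢
  exact le_trans h1 h2

-- outer 'while len(positions) < n' loop
def outerA (n : Int) (pos : List (Int × Int)) (ring : Nat) : List (Int × Int) :=
  if h : (pos.length : Int) < n then
    if hr : ring = 0 then outerA n (pos ++ [((0 : Int), (0 : Int))]) (ring + 1)
    else outerA n (ringA n ring pos) (ring + 1)
  else pos
termination_by (n - pos.length).toNat
decreasing_by
  · simp only [List.length_append, List.length_cons, List.length_nil]
    omega
  · have := ringA_len_succ n ring pos hr h
    omega

def hex_grid_positions (n : Int) : List (Int × Int) :=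
  PySem.List.slice (outerA n [] 0) none (some n)   -- positions[:n]

-- ===== PORT B =====
-- the galloping 'while 1 + 3*hi*(hi+1) <= i: hi = 2*hi + 1' upper-bound search
def gallop (i : Int) (hi : Nat) : Nat :=
  if h : 1 + 3 * (hi : Int) * ((hi : Int) + 1) ≤ i then gallop i (2 * hi + 1) else hi
termination_by i.toNat - hi
decreasing_by
  have h1 : 2 * (hi : Int) ≤ 3 * (hi : Int) * ((hi : Int) + 1) := by
    nlinarith [Int.natCast_nonneg hi]
  have h2 : 2 * (hi : Int) + 1 ≤ i := by omega
  omega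

-- the 'while lo < hi' binary search for the smallest r with 1 + 3*r*(r+1) > i
def bsearch (i : Int) (lo hi : Nat) : Nat :=
  if lo < hi then
    let mid := (lo + hi) / 2
    if 1 + 3 * (mid : Int) * ((mid : Int) + 1) ≤ i then bsearch i (mid + 1) hi
    else bsearch i lo mid
  else lo
termination_by hi - lo
decreasing_by
  · omega
  · omega

-- _ring_of(i)
def ringOf (i : Int) : Nat := bsearch i 1 (gallop i 1)

-- _pos(i): the closed-form coordinate of spiral index i
def posB (i : Int) : Int × Int :=
  if i = 0 then (0, 0)
  else
    let r : Int := (ringOf i : Nat)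
    let off := i - (1 + 3 * (r - 1) * r)
    let side := PySem.Int.floordiv off r
    let step := PySem.Int.mod off r
    -- 'for dx, dy in _HEX_DIRS[:side]'
    let c := (PySem.List.slice hexDirs none (some side)).foldl
      (fun p d => (p.1 + r * d.1, p.2 + r * d.2)) (r, 0)
    -- '_HEX_DIRS[side]' (side is always 0..5, so the lookup never fails; default unreachable)
    let d := (PySem.List.pyGet? hexDirs side).getD (0, 0)
    (c.1 + step * d.1, c.2 + step * d.2)

def hex_grid_positions_alt (n : Int) : List (Int × Int) :=
  (PySem.List.pyRange 0 n 1).map posB   -- [_pos(i) for i in range(n)]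

-- ===== PRECONDITION & SPEC =====
def Spec_hex_grid_positions (n : Int) (out : List (Int × Int)) : Prop := out = hex_grid_positions_alt n
instance (n : Int) (out : List (Int × Int)) : Decidable (Spec_hex_grid_positions n out) := by unfold Spec_hex_grid_positions; infer_instance

-- ===== CLAIM (what is proved, stated in full; the proofs are below) =====
def Claim_equal_hex_grid_positions : Prop := ∀ (n : Int), Dom_hex_grid_positions n → Spec_hex_grid_positions n (hex_grid_positions n)

-- ===== LEMMAS AND PROOFS =====

-- one straight side of a ring: k points from (x,y) stepping by d
def ringSeg (x y : Int) (d : Int × Int) : Nat → List (Int × Int)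
  | 0 => []
  | Nat.succ k => (x, y) :: ringSeg (x + d.1) (y + d.2) d k

-- the sides walked for a list of directions, corner advancing by r·d each time
def segs (x y : Int) (r : Nat) : List (Int × Int) → List (Int × Int)
  | [] => []
  | d :: ds => ringSeg x y d r ++ segs (x + (r : Int) * d.1) (y + (r : Int) * d.2) r ds

-- full ring r as A generates it
def ringBlock (r : Nat) : List (Int × Int) :=
  if r = 0 then [(0, 0)] else segs (r : Int) 0 r hexDirs

-- the spiral truncated to complete rings 0..R-1
def spiral : Nat → List (Int × Int)
  | 0 => []
  | Nat.succ R => spiral R ++ ringBlock R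

theorem ringSeg_length (d : Int × Int) : ∀ (k : Nat) (x y : Int), (ringSeg x y d k).length = k := by
  intro k; induction k with
  | zero => intro x y; simp [ringSeg]
  | succ k ih => intro x y; simp [ringSeg, ih]

theorem ringSeg_getElem (d : Int × Int) :
    ∀ (k : Nat) (x y : Int) (j : Nat) (hj : j < k),
      (ringSeg x y d k)[j]'(by rw [ringSeg_length]; exact hj)
        = (x + (j : Int) * d.1, y + (j : Int) * d.2) := by
  intro k
  induction k with
  | zero => intro x y j hj; omega
  | succ k ih =>
      intro x y j hj
      cases j with
      | zero => simp [ringSeg]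
      | succ j =>
          simp only [ringSeg, List.getElem_cons_succ]
          rw [ih _ _ j (by omega)]
          simp only [Prod.mk.injEq]
          constructor <;> (push_cast; ring)

theorem segs_length (r : Nat) :
    ∀ (ds : List (Int × Int)) (x y : Int), (segs x y r ds).length = ds.length * r := by
  intro ds
  induction ds with
  | nil => intro x y; simp [segs]
  | cons d ds ih => intro x y; simp [segs, ringSeg_length, ih]; ring

theorem innerA_sat (n : Int) (d : Int × Int) (k : Nat) (pos : List (Int × Int)) (x y : Int)
    (h : ¬ ((pos.length : Int) < n)) : innerA n d (pos, x, y) k = (pos, x, y) := by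
  cases k <;> simp [innerA, h]

theorem innerA_fst (n : Int) (d : Int × Int) :
    ∀ (k : Nat) (pos : List (Int × Int)) (x y : Int),
      (innerA n d (pos, x, y) k).1 = pos ++ (ringSeg x y d k).take (n - pos.length).toNat := by
  intro k
  induction k with
  | zero => intro pos x y; simp [innerA, ringSeg]
  | succ k ih =>
      intro pos x y
      simp only [innerA]
      split
      · rename_i h
        rw [ih]
        have hc : (n - pos.length).toNat = (n - ((pos ++ [(x,y)]).length : Int)).toNat + 1 := by
          simp only [List.length_append, List.length_cons, List.length_nil]
          push_cast; omega
        rw [hc]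
        simp [ringSeg, List.take_succ_cons]
      · rename_i h
        have : (n - pos.length).toNat = 0 := by omega
        simp [this]

theorem innerA_full (n : Int) (d : Int × Int) :
    ∀ (k : Nat) (pos : List (Int × Int)) (x y : Int),
      ((pos.length : Int) + k ≤ n) →
      innerA n d (pos, x, y) k = (pos ++ ringSeg x y d k, x + (k : Int) * d.1, y + (k : Int) * d.2) := by
  intro k
  induction k with
  | zero => intro pos x y h; simp [innerA, ringSeg]
  | succ k ih =>
      intro pos x y h
      have hlt : (pos.length : Int) < n := by push_cast at h ⊢; omega
      simp only [innerA, hlt, if_pos]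
      rw [ih _ _ _ (by simp only [List.length_append, List.length_cons, List.length_nil]; push_cast at h ⊢; omega)]
      simp only [ringSeg, List.append_assoc, List.singleton_append, Prod.mk.injEq]
      refine ⟨by trivial, by push_cast; ring, by push_cast; ring⟩

theorem foldl_innerA_sat (n : Int) (r : Nat) :
    ∀ (ds : List (Int × Int)) (st : List (Int × Int) × Int × Int),
      ¬ ((st.1.length : Int) < n) → (ds.foldl (fun st d => innerA n d st r) st) = st := by
  intro ds
  induction ds with
  | nil => intro st h; simp
  | cons d ds ih =>
      rintro ⟨pos, x, y⟩ h
      simp only [List.foldl_cons]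
      rw [innerA_sat n d r pos x y h]
      exact ih _ h

theorem foldl_innerA_fst (n : Int) (r : Nat) :
    ∀ (ds : List (Int × Int)) (pos : List (Int × Int)) (x y : Int),
      ((ds.foldl (fun st d => innerA n d st r) (pos, x, y))).1
        = pos ++ (segs x y r ds).take (n - pos.length).toNat := by
  intro ds
  induction ds with
  | nil => intro pos x y; simp [segs]
  | cons d ds ih =>
      intro pos x y
      simp only [List.foldl_cons, segs]
      by_cases hsat : (pos.length : Int) < n
      · by_cases hfull : (pos.length : Int) + r ≤ n
        · rw [innerA_full n d r pos x y hfull, ih]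
          rw [List.take_append]
          rw [List.take_of_length_le (l := ringSeg x y d r) (by rw [ringSeg_length]; omega)]
          have hA : (n - ((pos ++ ringSeg x y d r).length : Int)).toNat
              = (n - (pos.length : Int)).toNat - (ringSeg x y d r).length := by
            simp only [List.length_append, ringSeg_length]; push_cast; omega
          rw [hA, List.append_assoc]
        · have hfst := innerA_fst n d r pos x y
          have hlen : ((innerA n d (pos, x, y) r).1.length : Int) = n := by
            rw [hfst]
            simp only [List.length_append, List.length_take, ringSeg_length]
            push_cast; omega
          rw [foldl_innerA_sat n r ds _ (by omega)]
          rw [hfst]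
          rw [List.take_append_of_le_length (by rw [ringSeg_length]; omega)]
      · rw [innerA_sat n d r pos x y hsat]
        rw [foldl_innerA_sat n r ds _ (by simpa using hsat)]
        have : (n - (pos.length : Int)).toNat = 0 := by omega
        simp [this]

theorem ringBlock_length (r : Nat) : (ringBlock r).length = if r = 0 then 1 else 6 * r := by
  unfold ringBlock
  split
  · simp
  · rw [segs_length]; rfl

theorem spiral_length_succ : ∀ (R : Nat), (spiral (R + 1)).length = 1 + 3 * R * (R + 1) := by
  intro R
  induction R with
  | zero => simp [spiral, ringBlock]
  | succ R ih =>
      show (spiral (R + 1) ++ ringBlock (R + 1)).length = _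
      rw [List.length_append, ih, ringBlock_length]
      simp only [Nat.succ_ne_zero, reduceIte]
      ring

theorem spiral_length_mono : ∀ (m R : Nat), (spiral R).length ≤ (spiral (R + m)).length := by
  intro m
  induction m with
  | zero => intro R; exact le_refl _
  | succ m ih =>
      intro R
      calc (spiral R).length ≤ (spiral (R + m)).length := ih R
        _ ≤ (spiral (R + m) ++ ringBlock (R + m)).length := by simp
        _ = (spiral (R + m + 1)).length := rfl

theorem spiral_take : ∀ (m R mlen : Nat), mlen ≤ (spiral R).length →
    (spiral (R + m)).take mlen = (spiral R).take mlen := by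
  intro m
  induction m with
  | zero => intro R mlen h; rfl
  | succ m ih =>
      intro R mlen h
      show (spiral (R + m) ++ ringBlock (R + m)).take mlen = _
      rw [List.take_append_of_le_length (le_trans h (spiral_length_mono m R))]
      exact ih R mlen h

theorem outer_main (n : Int) (hn : 0 ≤ n) :
    ∀ (m ring R : Nat), R = ring + m → n ≤ ((spiral R).length : Int) →
      (outerA n (spiral ring) ring).take n.toNat = (spiral R).take n.toNat := by
  intro m
  induction m with
  | zero =>
      intro ring R hR hlen
      subst hR
      rw [outerA, dif_neg (by omega)]
  | succ m ih =>
      intro ring R hR hlen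
      subst hR
      by_cases hstop : n ≤ ((spiral ring).length : Int)
      · rw [outerA, dif_neg (by omega)]
        exact (spiral_take (m + 1) ring n.toNat (by omega)).symm
      · have hlt : ((spiral ring).length : Int) < n := by omega
        rw [outerA, dif_pos hlt]
        by_cases hr : ring = 0
        · rw [dif_pos hr]
          subst hr
          have hnew : spiral 0 ++ [((0 : Int), (0 : Int))] = spiral 1 := rfl
          rw [hnew]
          exact ih 1 (0 + (m + 1)) (by omega) hlen
        · rw [dif_neg hr]
          have hringA : ringA n ring (spiral ring)
              = spiral ring ++ (ringBlock ring).take (n - ((spiral ring).length : Int)).toNat := by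
            unfold ringA
            rw [foldl_innerA_fst n ring hexDirs (spiral ring) (ring : Int) 0]
            unfold ringBlock
            rw [if_neg hr]
          have hblock : ((spiral (ring + 1)).length) = (spiral ring).length + (ringBlock ring).length := by
            show (spiral ring ++ ringBlock ring).length = _
            simp
          by_cases hfit : n ≤ ((spiral (ring + 1)).length : Int)
          · have hidx : (n - ((spiral ring).length : Int)).toNat
                = n.toNat - (spiral ring).length := by omega
            have hnew : ringA n ring (spiral ring) = (spiral (ring + 1)).take n.toNat := by
              rw [hringA, hidx]
              show spiral ring ++ (ringBlock ring).take (n.toNat - (spiral ring).length)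
                  = (spiral ring ++ ringBlock ring).take n.toNat
              rw [List.take_append, List.take_of_length_le (l := spiral ring) (by omega)]
            rw [hnew]
            have hlennew : ((spiral (ring + 1)).take n.toNat).length = n.toNat := by
              rw [List.length_take]
              omega
            rw [outerA, dif_neg (by rw [hlennew]; omega)]
            rw [List.take_of_length_le (by rw [hlennew])]
            have hRR : ring + (m + 1) = (ring + 1) + m := by omega
            rw [hRR]
            exact (spiral_take m (ring + 1) n.toNat (by omega)).symm
          · have hnew : ringA n ring (spiral ring) = spiral (ring + 1) := by
              rw [hringA]
              rw [List.take_of_length_le (by omega)]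
              rfl
            rw [hnew]
            exact ih (ring + 1) (ring + (m + 1)) (by omega) hlen

theorem spiral_length_ge : ∀ (R : Nat), R ≤ (spiral R).length := by
  intro R
  induction R with
  | zero => simp
  | succ R ih =>
      show R + 1 ≤ (spiral R ++ ringBlock R).length
      rw [List.length_append, ringBlock_length]
      split <;> omega

theorem gallop_not (i : Int) : ∀ (hi : Nat),
    ¬ (1 + 3 * ((gallop i hi : Nat) : Int) * (((gallop i hi : Nat) : Int) + 1) ≤ i) := by
  intro hi
  induction hi using gallop.induct i with
  | case1 hi h ih => rw [gallop, dif_pos h]; exact ih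
  | case2 hi h => rw [gallop, dif_neg h]; exact h

theorem bsearch_eq (i : Int) (r : Nat)
    (hcondlt : ∀ s : Nat, s < r → 1 + 3 * (s : Int) * ((s : Int) + 1) ≤ i)
    (hcondge : ∀ s : Nat, r ≤ s → ¬ (1 + 3 * (s : Int) * ((s : Int) + 1) ≤ i)) :
    ∀ (k lo hi : Nat), hi - lo ≤ k → lo ≤ r → r ≤ hi → bsearch i lo hi = r := by
  intro k
  induction k with
  | zero =>
      intro lo hi hk hlo hhi
      rw [bsearch, if_neg (by omega)]
      omega
  | succ k ih =>
      intro lo hi hk hlo hhi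
      by_cases hlt : lo < hi
      · rw [bsearch, if_pos hlt]
        by_cases hc : 1 + 3 * (((lo + hi) / 2 : Nat) : Int) * ((((lo + hi) / 2 : Nat) : Int) + 1) ≤ i
        · rw [if_pos hc]
          have hmidr : (lo + hi) / 2 < r := by
            by_contra hge
            exact hcondge _ (by omega) hc
          exact ih ((lo + hi) / 2 + 1) hi (by omega) (by omega) hhi
        · rw [if_neg hc]
          have hmidr : r ≤ (lo + hi) / 2 := by
            by_contra hge
            exact hc (hcondlt _ (by omega))
          exact ih lo ((lo + hi) / 2) (by omega) hlo hmidr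
      · rw [bsearch, if_neg hlt]
        omega

theorem ringOf_eq (i : Int) (r : Nat) (h1 : 1 ≤ r)
    (hlo : 1 + 3 * ((r : Int) - 1) * (r : Int) ≤ i)
    (hhi : i < 1 + 3 * (r : Int) * ((r : Int) + 1)) :
    ringOf i = r := by
  have hcondlt : ∀ s : Nat, s < r → 1 + 3 * (s : Int) * ((s : Int) + 1) ≤ i := by
    intro s hs
    have hsr : (s : Int) ≤ (r : Int) - 1 := by omega
    have hs0 : (0 : Int) ≤ (s : Int) := Int.natCast_nonneg s
    nlinarith
  have hcondge : ∀ s : Nat, r ≤ s → ¬ (1 + 3 * (s : Int) * ((s : Int) + 1) ≤ i) := by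
    intro s hs hc
    have hsr : (r : Int) ≤ (s : Int) := by omega
    have hr0 : (0 : Int) ≤ (r : Int) := Int.natCast_nonneg r
    nlinarith
  have hg : r ≤ gallop i 1 := by
    by_contra hgr
    exact gallop_not i 1 (hcondlt _ (by omega))
  exact bsearch_eq i r hcondlt hcondge (gallop i 1 - 1) 1 (gallop i 1) (by omega) h1 hg

theorem segs_getElem (r : Nat) (hr : 0 < r) :
    ∀ (ds : List (Int × Int)) (x y : Int) (j : Nat) (hj : j < ds.length * r),
      (segs x y r ds)[j]'(by rw [segs_length]; exact hj)
        = (((ds.take (j / r)).foldl (fun p d => (p.1 + (r : Int) * d.1, p.2 + (r : Int) * d.2)) (x, y)).1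
             + ((j % r : Nat) : Int) * (ds[j / r]'(by exact Nat.div_lt_of_lt_mul (Nat.mul_comm ds.length r ▸ hj))).1,
           ((ds.take (j / r)).foldl (fun p d => (p.1 + (r : Int) * d.1, p.2 + (r : Int) * d.2)) (x, y)).2
             + ((j % r : Nat) : Int) * (ds[j / r]'(by exact Nat.div_lt_of_lt_mul (Nat.mul_comm ds.length r ▸ hj))).2) := by
  intro ds
  induction ds with
  | nil => intro x y j hj; exact absurd hj (by simp)
  | cons d ds ih =>
      intro x y j hj
      by_cases hjr : j < r
      · have hq : j / r = 0 := Nat.div_eq_of_lt hjr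
        have hm : j % r = j := Nat.mod_eq_of_lt hjr
        simp only [segs]
        rw [List.getElem_append_left (by rw [ringSeg_length]; exact hjr)]
        rw [ringSeg_getElem d r x y j hjr]
        simp [hq, hm]
      · have hjr' : r ≤ j := Nat.le_of_not_lt hjr
        have hj' : j - r < ds.length * r := by
          rw [List.length_cons, Nat.succ_mul] at hj
          omega
        have hdiv : (j - r) / r = j / r - 1 := by
          have := Nat.sub_mul_div j r 1
          simpa using this
        have hmod : (j - r) % r = j % r := by
          have := Nat.sub_mul_mod (x := j) (k := 1) (n := r) (by omega)
          simpa using this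
        have hq1 : 1 ≤ j / r := (Nat.one_le_div_iff hr).2 hjr'
        simp only [segs]
        rw [List.getElem_append_right (by rw [ringSeg_length]; exact hjr')]
        simp only [ringSeg_length]
        rw [ih (x + (r : Int) * d.1) (y + (r : Int) * d.2) (j - r) hj']
        obtain ⟨q, hq⟩ : ∃ q, j / r = q + 1 := ⟨j / r - 1, by omega⟩
        simp only [hdiv, hmod, hq, Nat.add_sub_cancel]
        simp only [List.take_succ_cons, List.foldl_cons, List.getElem_cons_succ]

theorem posB_spiral : ∀ (R i : Nat) (h : i < (spiral R).length),
    posB (i : Int) = (spiral R)[i]'h := by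
  intro R
  induction R with
  | zero => intro i h; simp [spiral] at h
  | succ R ih =>
      intro i h
      show posB (i : Int) = (spiral R ++ ringBlock R)[i]'(h)
      by_cases hi : i < (spiral R).length
      · rw [List.getElem_append_left hi]
        exact ih i hi
      · have hge : (spiral R).length ≤ i := Nat.le_of_not_lt hi
        rw [List.getElem_append_right hge]
        have hj : i - (spiral R).length < (ringBlock R).length := by
          have := h
          simp only [spiral, List.length_append] at this
          omega
        cases R with
        | zero =>
            have hi0 : i = 0 := by
              simp only [ringBlock_length] at hj
              simpa [spiral] using hj
            subst hi0
            simp [posB, spiral, ringBlock]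
        | succ s =>
            have hlenR : (spiral (s + 1)).length = 1 + 3 * s * (s + 1) := spiral_length_succ s
            have hblock : (ringBlock (s + 1)).length = 6 * (s + 1) := by
              rw [ringBlock_length]; simp
            have hne : (i : Int) ≠ 0 := by
              have : 1 ≤ i := by omega
              omega
            -- the ring search lands on s+1
            have hfr : ringOf (i : Int) = s + 1 := by
              apply ringOf_eq (i : Int) (s + 1) (by omega)
              · have hlo : ((1 + 3 * s * (s + 1) : Nat) : Int) ≤ (i : Int) := by
                  exact_mod_cast (hlenR ▸ hge)
                push_cast at hlo ⊢
                nlinarith [hlo]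
              · have hup : i < (1 + 3 * s * (s + 1)) + 6 * (s + 1) := by omega
                have hup' : ((i : Nat) : Int) < ((1 + 3 * s * (s + 1) + 6 * (s + 1) : Nat) : Int) := by
                  exact_mod_cast hup
                push_cast at hup' ⊢
                nlinarith [hup']
            -- the offset inside the ring is the append index j
            have hoff : (i : Int) - (1 + 3 * (((s + 1 : Nat) : Int) - 1) * ((s + 1 : Nat) : Int))
                = ((i - (spiral (s + 1)).length : Nat) : Int) := by
              rw [hlenR]
              push_cast [hlenR ▸ hge]
              ring
            set j : Nat := i - (spiral (s + 1)).length with hjdef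
            have hj6 : j < 6 * (s + 1) := by omega
            have hq6 : j / (s + 1) < 6 := Nat.div_lt_of_lt_mul (by omega)
            -- evaluate posB
            rw [posB]
            rw [if_neg hne]
            simp only [hfr, hoff]
            rw [PySem.Int.floordiv_natCast j (s + 1), PySem.Int.mod_natCast j (s + 1)]
            rw [PySem.List.slice_to_natCast]
            rw [PySem.List.pyGet?_natCast hexDirs (j / (s + 1))]
            rw [List.getElem?_eq_getElem (by simpa [hexDirs] using hq6)]
            simp only [Option.getD_some]
            -- evaluate the spiral side
            have hrb : ringBlock (s + 1) = segs ((s + 1 : Nat) : Int) 0 (s + 1) hexDirs := by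
              rw [ringBlock, if_neg (by omega)]
            simp only [hrb]
            rw [segs_getElem (s + 1) (by omega) hexDirs ((s + 1 : Nat) : Int) 0 j
              (by simpa [hexDirs] using hj6)]

-- ===== VERDICT (by name: the statement is the Claim_ definition above) =====
theorem hex_grid_positions_spec : Claim_equal_hex_grid_positions := by
  intro n _
  unfold Spec_hex_grid_positions hex_grid_positions hex_grid_positions_alt
  by_cases hn : n ≤ 0
  · rw [PySem.List.pyRange_one_eq_nil hn]
    rw [outerA]
    simp only [List.length_nil, Nat.cast_zero]
    rw [dif_neg (by omega)]
    simp [PySem.List.slice]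
  · have hn : 0 < n := by omega
    have hR : n ≤ ((spiral (n.toNat + 1)).length : Int) := by
      have := spiral_length_ge (n.toNat + 1)
      omega
    have hA : PySem.List.slice (outerA n [] 0) none (some n)
        = (spiral (n.toNat + 1)).take n.toNat := by
      rw [PySem.List.slice_to _ (by omega)]
      exact outer_main n (by omega) (n.toNat + 1) 0 (n.toNat + 1) (by omega) hR
    rw [hA]
    have hB : PySem.List.pyRange 0 n 1 = (List.range n.toNat).map (fun k : Nat => (k : Int)) := by
      have hcast := PySem.List.pyRange_zero_natCast n.toNat
      rwa [Int.toNat_of_nonneg (by omega)] at hcast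
    rw [hB, List.map_map]
    apply List.ext_getElem
    · simp
      omega
    · intro i h1 h2
      simp only [List.getElem_take, List.getElem_map, List.getElem_range, Function.comp]
      exact (posB_spiral (n.toNat + 1) i (by simp at h1; omega)).symm
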